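-- pv_equiv track=rewrite | github.com/THUfl12/bipartite-louvain | src/new_bilouvain.py | __renumber
-- ===== SOURCE A (Python) =====
-- def __renumber(dictionary):
--     count = 0
--     ret = dictionary.copy()
--     new_values = dict([])
--
--     for key in dictionary.keys():
--         value = dictionary[key]
--         new_value = new_values.get(value, -1)
--         if new_value == -1:
--             new_values[value] = count
--             new_value = count
--             count += 1
--         ret[key] = new_value
--
--     return ret
-- ===== SOURCE B (Python) =====
-- def __renumber(dictionary):
--     vals = list(dictionary.values())
--     return {key: len(set(vals[:vals.index(value)])) for key, value in dictionary.items()}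
-- ===== Notes on version B (the rewrite author's own statement) =====
-- stated objective: alternative
-- what changed: B computes each label by a closed-form characterisation -- the number of distinct values occurring before the value's first occurrence -- via vals.index and a prefix set, instead of A's stateful loop with a running counter, a -1 sentinel and an incrementally built value-to-label table.
import Mathlib
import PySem

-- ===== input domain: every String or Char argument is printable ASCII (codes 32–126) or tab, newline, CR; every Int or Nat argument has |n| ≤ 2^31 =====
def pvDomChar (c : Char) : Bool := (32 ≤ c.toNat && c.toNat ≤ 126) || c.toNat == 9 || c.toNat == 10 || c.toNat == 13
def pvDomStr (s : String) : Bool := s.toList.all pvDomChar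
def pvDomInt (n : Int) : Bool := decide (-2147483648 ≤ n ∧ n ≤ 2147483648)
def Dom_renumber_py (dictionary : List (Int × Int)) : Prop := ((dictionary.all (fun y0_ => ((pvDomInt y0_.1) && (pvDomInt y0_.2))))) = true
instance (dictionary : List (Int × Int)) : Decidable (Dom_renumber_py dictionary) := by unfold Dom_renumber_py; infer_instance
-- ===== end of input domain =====

-- B replaces A's stateful counter/table loop by a closed-form per-key label: the number of
-- distinct values before the value's first occurrence (prefix set + index); objective: alternative.

-- ===== PORT A =====
-- A's fused loop: count, ret (a copy being overwritten in place), new_values, iterated over keys().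
def renumber_py (dictionary : List (Int × Int)) : List (Int × Int) :=
  let d := PySem.Dict.ofList dictionary
  -- state = (count, ret, new_values)
  let fin := d.keys.foldl
    (fun (st : Int × PySem.Dict Int Int × PySem.Dict Int Int) key =>
      let value := d.getD key 0      -- dictionary[key]; key comes from keys(), so KeyError is impossible
      let new_value := st.2.2.getD value (-1)
      if new_value = -1 then
        (st.1 + 1, st.2.1.insert key st.1, st.2.2.insert value st.1)
      else
        (st.1, st.2.1.insert key new_value, st.2.2))
    (0, d, PySem.Dict.empty)
  fin.2.1.items

-- ===== PORT B =====
-- B: vals = list(values()); label of (key, value) = len(set(vals[:vals.index(value)])).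
def renumber_py_alt (dictionary : List (Int × Int)) : List (Int × Int) :=
  let d := PySem.Dict.ofList dictionary
  let vals := d.values
  d.items.map (fun kv =>
    (kv.1,
      ((PySem.Set.ofList
          (PySem.List.slice vals none
            (some (((PySem.List.index? vals kv.2).getD 0 : Nat) : Int)))).length : Int)))
  -- vals.index(value) cannot raise: value ∈ vals, so index? is some; .getD 0 is the transliteration's total form

-- ===== PRECONDITION & SPEC =====
def Spec_renumber_py (dictionary : List (Int × Int)) (out : List (Int × Int)) : Prop := out = renumber_py_alt dictionary
instance (dictionary : List (Int × Int)) (out : List (Int × Int)) : Decidable (Spec_renumber_py dictionary out) := by unfold Spec_renumber_py; infer_instance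

-- ===== CLAIM =====
def Claim_equal_renumber_py : Prop := ∀ (dictionary : List (Int × Int)), Dom_renumber_py dictionary → Spec_renumber_py dictionary (renumber_py dictionary)

-- ===== LEMMAS AND PROOFS =====

-- A's table loop, over values only.
def vloop (l : List Int) (m : PySem.Dict Int Int) : PySem.Dict Int Int :=
  l.foldl (fun m v => if m.contains v then m else m.insert v (m.size : Int)) m

-- A's loop, as a fold over (key, value) pairs.
def aloop (l : List (Int × Int)) (st : Int × PySem.Dict Int Int × PySem.Dict Int Int) :
    Int × PySem.Dict Int Int × PySem.Dict Int Int :=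
  l.foldl
    (fun st kv =>
      let new_value := st.2.2.getD kv.2 (-1)
      if new_value = -1 then
        (st.1 + 1, st.2.1.insert kv.1 st.1, st.2.2.insert kv.2 st.1)
      else
        (st.1, st.2.1.insert kv.1 new_value, st.2.2)) st

-- overwrite loop: insert g kv at key kv.1, in order
def wloop (g : Int × Int → Int) (l : List (Int × Int)) (r : PySem.Dict Int Int) : PySem.Dict Int Int :=
  l.foldl (fun r kv => r.insert kv.1 (g kv)) r

-- B's label: number of distinct values before v's first occurrence.
def lab (vals : List Int) (v : Int) : Int :=
  ((PySem.Set.ofList (vals.take ((PySem.List.index? vals v).getD 0))).length : Int)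

def bloop (l : List (Int × Int)) (m : PySem.Dict Int Int) : PySem.Dict Int Int :=
  vloop (l.map (·.2)) m

theorem vloop_cons (x : Int) (t : List Int) (m : PySem.Dict Int Int) :
    vloop (x :: t) m = vloop t (if m.contains x then m else m.insert x (m.size : Int)) := rfl

theorem vloop_append_singleton (l : List Int) (x : Int) (m : PySem.Dict Int Int) :
    vloop (l ++ [x]) m =
      (if (vloop l m).contains x then vloop l m
       else (vloop l m).insert x ((vloop l m).size : Int)) := by
  simp [vloop, List.foldl_append]

theorem wloop_cons (g : Int × Int → Int) (kv : Int × Int) (t : List (Int × Int))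
    (r : PySem.Dict Int Int) : wloop g (kv :: t) r = wloop g t (r.insert kv.1 (g kv)) := rfl

theorem aloop_cons (kv : Int × Int) (t : List (Int × Int))
    (st : Int × PySem.Dict Int Int × PySem.Dict Int Int) :
    aloop (kv :: t) st =
      aloop t
        (if st.2.2.getD kv.2 (-1) = -1 then
          (st.1 + 1, st.2.1.insert kv.1 st.1, st.2.2.insert kv.2 st.1)
        else
          (st.1, st.2.1.insert kv.1 (st.2.2.getD kv.2 (-1)), st.2.2)) := by
  simp only [aloop, List.foldl]

theorem vloop_get?_of_contains (l : List Int) (m : PySem.Dict Int Int) (v : Int)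
    (h : m.contains v = true) : (vloop l m).get? v = m.get? v := by
  induction l generalizing m with
  | nil => rfl
  | cons x t ih =>
    rw [vloop_cons]
    by_cases hc : m.contains x = true
    · rw [if_pos hc, ih m h]
    · simp only [Bool.not_eq_true] at hc
      have hne : v ≠ x := by intro e; rw [e] at h; rw [h] at hc; simp at hc
      rw [hc, if_neg (by simp), ih (m.insert x (m.size : Int))
          (by rw [PySem.Dict.contains_insert]; simp [h]),
        PySem.Dict.get?_insert_of_ne _ _ hne]

theorem vloop_getD_of_contains (l : List Int) (m : PySem.Dict Int Int) (v : Int)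
    (h : m.contains v = true) : (vloop l m).getD v 0 = m.getD v 0 := by
  rw [PySem.Dict.getD_eq_get?_getD, PySem.Dict.getD_eq_get?_getD, vloop_get?_of_contains l m v h]

theorem aloop_eq (l : List (Int × Int)) (count : Int) (r m : PySem.Dict Int Int)
    (hnn : ∀ v c, m.get? v = some c → 0 ≤ c) (hcnt : count = (m.size : Int)) :
    aloop l (count, r, m) =
      (((bloop l m).size : Int), wloop (fun kv => (bloop l m).getD kv.2 0) l r, bloop l m) := by
  induction l generalizing count r m with
  | nil => simp [aloop, bloop, vloop, wloop, hcnt]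
  | cons kv t ih =>
    by_cases hc : m.contains kv.2 = true
    · obtain ⟨c, hc2⟩ : ∃ c, m.get? kv.2 = some c := by
        have := PySem.Dict.contains_eq_isSome_get? m kv.2
        rw [hc] at this
        exact Option.isSome_iff_exists.mp this.symm
      have hc0 : 0 ≤ c := hnn _ _ hc2
      have hgd : m.getD kv.2 (-1) = c := PySem.Dict.getD_of_get?_eq_some _ _ hc2
      have hgd0 : m.getD kv.2 0 = c := PySem.Dict.getD_of_get?_eq_some _ _ hc2
      have hb : bloop (kv :: t) m = bloop t m := by
        simp only [bloop, List.map, vloop_cons, hc, if_pos]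
      have hw : (bloop t m).getD kv.2 0 = c := by
        rw [bloop, vloop_getD_of_contains _ m kv.2 hc, hgd0]
      rw [aloop_cons]
      simp only [hgd]
      rw [if_neg (by omega), ih count (r.insert kv.1 c) m hnn hcnt, hb, wloop_cons]
      simp only [hw]
    · simp only [Bool.not_eq_true] at hc
      have hgd : m.getD kv.2 (-1) = -1 := PySem.Dict.getD_of_not_contains _ _ hc
      set m1 := m.insert kv.2 (m.size : Int) with hm1
      have hb : bloop (kv :: t) m = bloop t m1 := by
        simp only [bloop, List.map, vloop_cons, hc]
        rw [if_neg (by simp)]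
      have hnn' : ∀ v c, m1.get? v = some c → 0 ≤ c := by
        intro v c h
        rw [hm1, PySem.Dict.get?_insert] at h
        split_ifs at h with hv
        · cases h; positivity
        · exact hnn _ _ h
      have hsz : count + 1 = (m1.size : Int) := by
        rw [hm1, PySem.Dict.size_insert]; simp [hc, hcnt]
      have hw : (bloop t m1).getD kv.2 0 = count := by
        rw [bloop, vloop_getD_of_contains _ _ _ (PySem.Dict.contains_insert_self _ _ _),
          PySem.Dict.getD_insert_self, hcnt]
      rw [aloop_cons]
      simp only [hgd]
      have hmc : m.insert kv.2 count = m1 := by rw [hm1, hcnt]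
      rw [if_true, hmc, ih (count + 1) (r.insert kv.1 count) m1 hnn' hsz, hb, wloop_cons]
      simp only [hw]

theorem wloop_get?_of_not_mem (g : Int × Int → Int) (l : List (Int × Int))
    (e : PySem.Dict Int Int) (k : Int) (h : k ∉ l.map (·.1)) :
    (wloop g l e).get? k = e.get? k := by
  induction l generalizing e with
  | nil => rfl
  | cons kv t ih =>
    simp only [List.map, List.mem_cons, not_or] at h
    rw [wloop_cons, ih _ h.2, PySem.Dict.get?_insert_of_ne _ _ h.1]

theorem wloop_get?_of_mem (g : Int × Int → Int) (l : List (Int × Int))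
    (e : PySem.Dict Int Int) (kv : Int × Int) (hm : kv ∈ l) (hnd : (l.map (·.1)).Nodup) :
    (wloop g l e).get? kv.1 = some (g kv) := by
  induction l generalizing e with
  | nil => cases hm
  | cons kv' t ih =>
    simp only [List.map, List.nodup_cons] at hnd
    rw [wloop_cons]
    rcases List.mem_cons.mp hm with h | h
    · subst h
      rw [wloop_get?_of_not_mem g t _ kv.1 hnd.1, PySem.Dict.get?_insert_self]
    · exact ih _ h hnd.2

theorem wloop_keys (g : Int × Int → Int) (l : List (Int × Int)) (e : PySem.Dict Int Int)
    (h : ∀ kv ∈ l, e.contains kv.1 = true) : (wloop g l e).keys = e.keys := by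
  induction l generalizing e with
  | nil => rfl
  | cons kv t ih =>
    have hk : (e.insert kv.1 (g kv)).keys = e.keys :=
      PySem.Dict.keys_insert_of_contains _ _ (h kv List.mem_cons_self)
    rw [wloop_cons, ih _ (by
      intro kv' hkv'
      rw [PySem.Dict.contains_eq_decide_mem_keys, hk,
        ← PySem.Dict.contains_eq_decide_mem_keys]
      exact h kv' (List.mem_cons_of_mem _ hkv')), hk]

-- The crux: A's table built over vals computes B's closed-form label at every value of vals.
theorem vloop_spec (vals : List Int) :
    (vloop vals PySem.Dict.empty).size = (PySem.Set.ofList vals).length ∧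
    ∀ v, (vloop vals PySem.Dict.empty).get? v =
      if v ∈ vals then some (lab vals v) else none := by
  induction vals using List.reverseRecOn with
  | nil => exact ⟨rfl, fun v => rfl⟩
  | append_singleton vals x ih =>
    obtain ⟨ihsz, ihg⟩ := ih
    set m := vloop vals PySem.Dict.empty with hm
    have hcont : ∀ v, m.contains v = true ↔ v ∈ vals := by
      intro v
      rw [PySem.Dict.contains_eq_isSome_get?, ihg v]
      by_cases h : v ∈ vals <;> simp [h]
    have hstab : ∀ v, v ∈ vals → lab (vals ++ [x]) v = lab vals v := by
      intro v hv
      unfold lab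
      rw [PySem.List.index?_append_of_mem [x] hv]
      obtain ⟨k, hk⟩ := Option.isSome_iff_exists.mp ((PySem.List.index?_isSome_iff vals v).mpr hv)
      obtain ⟨hklt, -, -⟩ := PySem.List.getElem_of_index?_eq_some hk
      rw [hk]
      simp only [Option.getD_some]
      rw [List.take_append_of_le_length (le_of_lt hklt)]
    rw [vloop_append_singleton]
    by_cases hc : m.contains x = true
    · have hx : x ∈ vals := (hcont x).mp hc
      rw [if_pos hc]
      constructor
      · rw [ihsz, PySem.Set.ofList_append_singleton,
          PySem.Set.add_of_mem ((PySem.Set.mem_ofList vals x).mpr hx)]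
      · intro v
        rw [ihg v]
        by_cases hv : v ∈ vals
        · rw [if_pos hv, if_pos (List.mem_append_left _ hv), hstab v hv]
        · rw [if_neg hv, if_neg (by
            simp only [List.mem_append, List.mem_singleton, not_or]
            exact ⟨hv, by rintro rfl; exact hv hx⟩)]
    · simp only [Bool.not_eq_true] at hc
      have hx : x ∉ vals := fun h => by rw [(hcont x).mpr h] at hc; cases hc
      rw [hc, if_neg (by simp)]
      constructor
      · rw [PySem.Dict.size_insert, hc, if_neg (by simp), ihsz,
          PySem.Set.ofList_append_singleton,
          PySem.Set.add_of_not_mem (fun h => hx ((PySem.Set.mem_ofList vals x).mp h)),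
          List.length_append, List.length_singleton]
      · intro v
        rw [PySem.Dict.get?_insert]
        by_cases hvx : v = x
        · subst hvx
          rw [if_pos rfl, if_pos (List.mem_append_right _ (List.mem_singleton_self v))]
          unfold lab
          rw [PySem.List.index?_append_singleton_self vals v hx]
          simp only [Option.getD_some, List.take_left]
          rw [ihsz]
        · rw [if_neg hvx, ihg v]
          by_cases hv : v ∈ vals
          · rw [if_pos hv, if_pos (List.mem_append_left _ hv), hstab v hv]
          · rw [if_neg hv, if_neg (by
              simp only [List.mem_append, List.mem_singleton, not_or]
              exact ⟨hv, hvx⟩)]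

theorem vloop_getD_eq_lab (vals : List Int) (v : Int) (hv : v ∈ vals) :
    (vloop vals PySem.Dict.empty).getD v 0 = lab vals v := by
  rw [PySem.Dict.getD_eq_get?_getD, (vloop_spec vals).2 v, if_pos hv]
  rfl

-- ===== VERDICT =====
theorem renumber_py_spec : Claim_equal_renumber_py := by
  intro dictionary _
  unfold Spec_renumber_py renumber_py renumber_py_alt
  set d := PySem.Dict.ofList dictionary with hd
  have hnd : d.keys.Nodup := PySem.Dict.nodup_keys_ofList dictionary
  have hkeys : d.keys = d.items.map (·.1) := rfl
  have hvals : d.values = d.items.map (·.2) := rfl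
  -- A's keys-fold is aloop over the items
  have hA : d.keys.foldl
      (fun (st : Int × PySem.Dict Int Int × PySem.Dict Int Int) key =>
        let value := d.getD key 0
        let new_value := st.2.2.getD value (-1)
        if new_value = -1 then
          (st.1 + 1, st.2.1.insert key st.1, st.2.2.insert value st.1)
        else
          (st.1, st.2.1.insert key new_value, st.2.2))
      (0, d, PySem.Dict.empty) = aloop d.items (0, d, PySem.Dict.empty) := by
    rw [hkeys, List.foldl_map]
    exact PySem.List.foldl_congr_mem _ _ _ _ (fun st kv hkv => by
      have hv : d.getD kv.1 0 = kv.2 :=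
        PySem.Dict.getD_of_mem_items d (by simpa using hkv) hnd 0
      simp only [hv])
  have hstep : aloop d.items (0, d, PySem.Dict.empty) =
      (((bloop d.items PySem.Dict.empty).size : Int),
        wloop (fun kv => (bloop d.items PySem.Dict.empty).getD kv.2 0) d.items d,
        bloop d.items PySem.Dict.empty) :=
    aloop_eq d.items 0 d PySem.Dict.empty
      (by intro v c h; rw [PySem.Dict.get?_empty] at h; cases h)
      (by rw [PySem.Dict.size_empty]; rfl)
  set g := fun kv : Int × Int => (bloop d.items PySem.Dict.empty).getD kv.2 0 with hg
  simp only [hA, hstep]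
  -- items of the overwrite loop = the comprehension over items
  have hcont : ∀ kv ∈ d.items, d.contains kv.1 = true := by
    intro kv hkv
    rw [PySem.Dict.contains_eq_decide_mem_keys]
    exact decide_eq_true (PySem.Dict.mem_keys_of_mem_items d hkv)
  have hwkeys : (wloop g d.items d).keys = d.keys := wloop_keys g d.items d hcont
  have hwnd : (wloop g d.items d).keys.Nodup := by rw [hwkeys]; exact hnd
  rw [PySem.Dict.items_eq_map_keys (wloop g d.items d) hwnd 0, hwkeys, hkeys, List.map_map]
  refine List.map_congr_left ?_
  intro kv hkv
  have h2 : (wloop g d.items d).get? kv.1 = some (g kv) :=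
    wloop_get?_of_mem g d.items d kv hkv (hkeys ▸ hnd)
  have hv2 : kv.2 ∈ d.values := by rw [hvals]; exact List.mem_map_of_mem hkv
  have hlab : g kv = lab d.values kv.2 := by
    rw [hg]
    simp only [bloop, ← hvals]
    exact vloop_getD_eq_lab d.values kv.2 hv2
  simp only [Function.comp, PySem.Dict.getD_of_get?_eq_some _ _ h2, hlab]
  -- unfold B's slice form into lab
  unfold lab
  rw [PySem.List.slice_to_natCast]
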